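-- pv_equiv track=rewrite | github.com/IT-coach-666/leetcode-public | leetcode_jy/jy_1001_1500/jy_1051_1100/jy_1051.py | heightChecker_v2
-- ===== SOURCE A (Python) =====
-- from typing import List, Dict
-- from typing import List
-- import collections
--
-- def heightChecker_v2(heights: List[int]) -> int:
--     # jy: 遍历 heights 计算出每个高度出现的次数;
--     counts = collections.Counter(heights)
--     # jy: 当前高度初始化为 1(即 1 是最低的);
--     current_height, count = 1, 0
--     # jy: 遍历 heights;
--     for height in heights:
--         # jy: 如果当前高度不存在于 counts 中, 则不断增加当前高度, 直到当前高度在 counts 中,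
--         #    该高度即为 heights 中的当前最低高度;
--         while counts[current_height] == 0:
--             current_height += 1
--         # jy: 如果当前最低高度不等于 heights 中的第一个位置的高度, 说明第一个位置的高度不是
--         #    最终排序的位置, 此时 count 加 1;
--         if current_height != height:
--             count += 1
--         # jy: 当前高度确认后, 其在 counts 中的个数减 1;
--         counts[current_height] -= 1
--
--     return count
-- ===== SOURCE B (Python) =====
-- from typing import List
--
--
-- def heightChecker_v2(heights: List[int]) -> int:
--     return sum(1 for orig, srt in zip(heights, sorted(heights)) if orig != srt)
-- ===== Notes on version B (the rewrite author's own statement) =====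
-- stated objective: idiomatic
-- what changed: Replaces the Counter-based counting-sort walk (running height pointer decremented through a dict) with a materialized sorted copy compared positionally in a single zip pass.
import Mathlib
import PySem

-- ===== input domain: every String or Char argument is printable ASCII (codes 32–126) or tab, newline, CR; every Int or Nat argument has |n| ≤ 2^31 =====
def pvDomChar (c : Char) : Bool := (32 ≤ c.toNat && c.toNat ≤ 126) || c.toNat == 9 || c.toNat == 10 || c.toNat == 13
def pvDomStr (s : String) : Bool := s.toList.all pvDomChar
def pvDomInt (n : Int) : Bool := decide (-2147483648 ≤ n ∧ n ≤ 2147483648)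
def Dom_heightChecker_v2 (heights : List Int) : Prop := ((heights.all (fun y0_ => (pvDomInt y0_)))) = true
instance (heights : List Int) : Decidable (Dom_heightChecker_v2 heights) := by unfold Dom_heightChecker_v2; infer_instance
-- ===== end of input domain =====

-- B replaces A's Counter-based counting-sort walk with a sorted copy compared positionally (idiomatic).
-- Pre_ excludes lists containing a height < 1, on which A's inner while loop never terminates.


-- ===== PORT A =====
-- the 'while counts[current_height] == 0: current_height += 1' loop, with a fuel bound
-- that only makes it total in Lean (under Pre_ the fuel always suffices, see lemmas below)
def hcFindHeight (counts : PySem.Dict Int Int) (cur : Int) : Nat → Int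
  | 0 => cur
  | fuel + 1 => if counts.getD cur 0 == 0 then hcFindHeight counts (cur + 1) fuel else cur

-- the 'for height in heights' loop: state (current_height, count, counts)
def hcLoopA (counts : PySem.Dict Int Int) (cur cnt : Int) : List Int → Int
  | [] => cnt
  | height :: rest =>
      let cur' := hcFindHeight counts cur (2 ^ 33)
      let cnt' := if cur' ≠ height then cnt + 1 else cnt
      hcLoopA (counts.insert cur' (counts.getD cur' 0 - 1)) cur' cnt' rest

def heightChecker_v2 (heights : List Int) : Int :=
  let counts := PySem.Dict.counter heights
  hcLoopA counts 1 0 heights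

-- ===== PORT B =====
def heightChecker_v2_alt (heights : List Int) : Int :=
  (heights.zip (PySem.List.sorted heights (fun x => x) false)).foldl
    (fun acc p => if p.1 ≠ p.2 then acc + 1 else acc) 0

-- ===== PRECONDITION & SPEC =====
-- Pre_ excludes lists containing a height < 1: there A's inner while loop climbs past every
-- recorded height and never terminates (the Python diverges), so A returns no value.
def Pre_heightChecker_v2 (heights : List Int) : Prop := ∀ x ∈ heights, 1 ≤ x
instance (heights : List Int) : Decidable (Pre_heightChecker_v2 heights) := by unfold Pre_heightChecker_v2; infer_instance
def pvWitness_heightChecker_v2 : List Int := [1, 1, 4, 2, 1, 3]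
def Spec_heightChecker_v2 (heights : List Int) (out : Int) : Prop := out = heightChecker_v2_alt heights
instance (heights : List Int) (out : Int) : Decidable (Spec_heightChecker_v2 heights out) := by unfold Spec_heightChecker_v2; infer_instance

-- ===== CLAIM (what is proved, stated in full; the proofs are below) =====
def Claim_equal_heightChecker_v2 : Prop := ∀ (heights : List Int), Dom_heightChecker_v2 heights → Pre_heightChecker_v2 heights → Spec_heightChecker_v2 heights (heightChecker_v2 heights)

-- ===== LEMMAS AND PROOFS =====

-- positional mismatch count between two lists
def hcMismatch : List Int → List Int → Int
  | [], _ => 0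
  | _ :: _, [] => 0
  | a :: as_, b :: bs => (if a ≠ b then (1 : Int) else 0) + hcMismatch as_ bs

lemma hcFindHeight_eq (counts : PySem.Dict Int Int) (cur m : Int) (fuel : Nat)
    (hcm : cur ≤ m) (hfuel : (m - cur).toNat < fuel)
    (hzero : ∀ h, cur ≤ h → h < m → counts.getD h 0 = 0)
    (hm : counts.getD m 0 ≠ 0) :
    hcFindHeight counts cur fuel = m := by
  induction fuel generalizing cur with
  | zero => omega
  | succ fuel ih =>
      simp only [hcFindHeight]
      by_cases hcur : cur = m
      · subst hcur; simp [hm]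
      · have h0 : counts.getD cur 0 = 0 := hzero cur le_rfl (by omega)
        simp only [h0, beq_self_eq_true, if_true]
        exact ih (cur + 1) (by omega) (by omega) (fun h h1 h2 => hzero h (by omega) h2)

lemma hcLoopA_eq (hs : List Int) (srt : List Int) (counts : PySem.Dict Int Int) (cur cnt : Int)
    (hcount : ∀ h, counts.getD h 0 = (srt.count h : Int))
    (hsorted : srt.Pairwise (· ≤ ·))
    (hge : ∀ x ∈ srt, cur ≤ x)
    (hbound : ∀ x ∈ srt, x ≤ 2147483648)
    (hcur : 1 ≤ cur)
    (hlen : hs.length ≤ srt.length) :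
    hcLoopA counts cur cnt hs = cnt + hcMismatch hs srt := by
  induction hs generalizing srt counts cur cnt with
  | nil => simp [hcLoopA, hcMismatch]
  | cons height rest ih =>
      obtain ⟨m, srest, rfl⟩ : ∃ m srest, srt = m :: srest := by
        cases srt with
        | nil => simp at hlen
        | cons a b => exact ⟨a, b, rfl⟩
      have hmem : m ∈ m :: srest := List.mem_cons_self
      have hmmin : ∀ x ∈ srest, m ≤ x := (List.pairwise_cons.mp hsorted).1
      have hfind : hcFindHeight counts cur (2 ^ 33) = m := by
        apply hcFindHeight_eq counts cur m _ (hge m hmem)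
        · have := hbound m hmem; omega
        · intro h h1 h2
          rw [hcount]
          have hc0 : (m :: srest).count h = 0 := by
            rw [List.count_eq_zero]
            intro hmemh
            rcases List.mem_cons.mp hmemh with rfl | hh
            · omega
            · exact absurd (hmmin h hh) (by omega)
          rw [hc0]; simp
        · rw [hcount]
          have := List.count_pos_iff.mpr hmem
          omega
      simp only [hcLoopA, hfind]
      have hcount' : ∀ h, (counts.insert m (counts.getD m 0 - 1)).getD h 0 = (srest.count h : Int) := by
        intro h
        rw [PySem.Dict.getD_insert]
        by_cases hh : h = m
        · subst hh
          rw [if_pos rfl, hcount]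
          rw [List.count_cons_self]
          push_cast
          ring
        · rw [if_neg hh, hcount]
          rw [List.count_cons_of_ne (Ne.symm hh)]
      have := ih srest (counts.insert m (counts.getD m 0 - 1)) m
        (if m ≠ height then cnt + 1 else cnt) hcount'
        (List.pairwise_cons.mp hsorted).2 hmmin
        (fun x hx => hbound x (List.mem_cons_of_mem m hx))
        (le_trans hcur (hge m hmem))
        (by simpa using hlen)
      rw [this, hcMismatch]
      by_cases hne : m ≠ height
      · have : height ≠ m := Ne.symm hne
        simp [hne, this]; ring
      · push Not at hne
        simp [hne]

lemma hcFold_eq_mismatch (xs ys : List Int) (c : Int) :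
    (xs.zip ys).foldl (fun acc p => if p.1 ≠ p.2 then acc + 1 else acc) c
      = c + hcMismatch xs ys := by
  induction xs generalizing ys c with
  | nil => simp [hcMismatch]
  | cons a as_ ih =>
      cases ys with
      | nil => simp [hcMismatch]
      | cons b bs =>
          simp only [List.zip_cons_cons, List.foldl_cons, hcMismatch, ih]
          by_cases h : a ≠ b
          · simp [h]; ring
          · push Not at h; simp [h]

-- ===== VERDICT (by name: the statement is the Claim_ definition above) =====
theorem heightChecker_v2_spec : Claim_equal_heightChecker_v2 := by
  intro heights hdom hpre
  unfold Spec_heightChecker_v2 heightChecker_v2 heightChecker_v2_alt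
  have hperm : (PySem.List.sorted heights (fun x => x) false).Perm heights :=
    PySem.List.sorted_perm heights (fun x => x) false
  have hmem : ∀ x, x ∈ PySem.List.sorted heights (fun x => x) false ↔ x ∈ heights :=
    fun x => hperm.mem_iff
  rw [hcLoopA_eq heights (PySem.List.sorted heights (fun x => x) false) _ 1 0
      (fun h => by rw [PySem.Dict.getD_counter]; exact_mod_cast (hperm.count_eq h).symm)
      (by simpa using PySem.List.sorted_pairwise heights (fun x => x))
      (fun x hx => hpre x ((hmem x).mp hx))
      (fun x hx => by
        have := hdom
        unfold Dom_heightChecker_v2 at this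
        rw [List.all_eq_true] at this
        have h2 := this x ((hmem x).mp hx)
        simp [pvDomInt] at h2
        omega)
      le_rfl
      (le_of_eq hperm.length_eq.symm),
    hcFold_eq_mismatch]
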